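-- pv_equiv track=rewrite | github.com/seah526/Baekjoon | 프로그래머스/unrated/181854. 배열의 길이에 따라 다른 연산하기/배열의 길이에 따라 다른 연산하기.py | solution
-- ===== SOURCE A (Python) =====
-- def solution(arr, n):
--     answer = []
--     if len(arr) % 2 :
--         for idx, i in enumerate(arr):
--             answer.append(i+n if idx%2==0 else i)
--     else :
--         for idx, i in enumerate(arr):
--             answer.append(i+n if idx%2 else i)
--     return answer
-- ===== SOURCE B (Python) =====
-- def solution(arr, n):
--     # Handle the lone leading element of an odd-length array, then walk the
--     # remainder two at a time: keep the first of each pair, bump the second.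
--     if len(arr) % 2:
--         out = [arr[0] + n]
--         rest = arr[1:]
--     else:
--         out = []
--         rest = arr
--     it = iter(rest)
--     for a in it:
--         b = next(it)
--         out.append(a)
--         out.append(b + n)
--     return out
-- ===== Notes on version B (the rewrite author's own statement) =====
-- stated objective: alternative
-- what changed: Replaces the two parity-specific enumerate scans that test idx%2 on every element with a single pairwise walk: fix up the odd head once, then consume the rest two elements at a time (keep, bump) with no index bookkeeping.
import Mathlib
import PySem

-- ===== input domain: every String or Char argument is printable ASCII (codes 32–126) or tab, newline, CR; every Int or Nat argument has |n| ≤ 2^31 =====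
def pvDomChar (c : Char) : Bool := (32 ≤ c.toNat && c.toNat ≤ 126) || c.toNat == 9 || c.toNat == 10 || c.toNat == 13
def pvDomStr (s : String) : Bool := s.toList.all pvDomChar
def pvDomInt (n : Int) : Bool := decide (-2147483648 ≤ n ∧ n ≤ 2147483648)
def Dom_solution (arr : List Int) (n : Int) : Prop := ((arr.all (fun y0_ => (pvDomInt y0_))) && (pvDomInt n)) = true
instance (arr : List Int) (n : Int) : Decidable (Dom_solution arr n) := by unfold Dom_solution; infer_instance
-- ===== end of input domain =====

-- B replaces A's two parity-specific full enumerate scans by one pairwise walk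
-- (fix the odd head, then keep/bump two elements at a time); alternative, not faster.

-- ===== PORT A =====
def solution (arr : List Int) (n : Int) : List Int :=
  if arr.length % 2 ≠ 0 then
    (PySem.List.enumerate arr 0).foldl
      (fun answer p => answer ++ [if p.1 % 2 = 0 then p.2 + n else p.2]) []
  else
    (PySem.List.enumerate arr 0).foldl
      (fun answer p => answer ++ [if p.1 % 2 ≠ 0 then p.2 + n else p.2]) []

-- ===== PORT B =====
-- the 'for a in it: b = next(it); out.append(a); out.append(b+n)' loop: consume two at a time
def pairLoop (n : Int) (out : List Int) : List Int → List Int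
  | a :: b :: rest => pairLoop n (out ++ [a] ++ [b + n]) rest
  | _ => out  -- empty iterator: loop ends ([x] is unreachable: rest always has even length)

def solution_alt (arr : List Int) (n : Int) : List Int :=
  if arr.length % 2 ≠ 0 then
    match arr with
    | a :: rest => pairLoop n [a + n] rest
    | [] => []  -- unreachable: odd length implies nonempty
  else
    pairLoop n [] arr

-- ===== PRECONDITION & SPEC =====
def Spec_solution (arr : List Int) (n : Int) (out : List Int) : Prop := out = solution_alt arr n
instance (arr : List Int) (n : Int) (out : List Int) : Decidable (Spec_solution arr n out) := by unfold Spec_solution; infer_instance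

-- ===== CLAIM (what is proved, stated in full; the proofs are below) =====
def Claim_equal_solution : Prop := ∀ (arr : List Int) (n : Int), Dom_solution arr n → Spec_solution arr n (solution arr n)

-- ===== LEMMAS AND PROOFS =====

-- pairLoop over an even-length list = accumulator ++ the enumerate-map with an even start index,
-- bumping the elements whose absolute index is odd (A's even-length branch body).
theorem pairLoop_even (n : Int) :
    ∀ (xs : List Int) (s : Int) (out : List Int), s % 2 = 0 → xs.length % 2 = 0 →
      pairLoop n out xs =
        out ++ (PySem.List.enumerate xs s).map (fun p => if p.1 % 2 ≠ 0 then p.2 + n else p.2)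
  | [], s, out, hs, hl => by simp [pairLoop, PySem.List.enumerate_nil]
  | [a], s, out, hs, hl => by simp at hl
  | a :: b :: rest, s, out, hs, hl => by
      have hrest : rest.length % 2 = 0 := by simp only [List.length_cons] at hl; omega
      have hs2 : (s + 2) % 2 = 0 := by omega
      have ha : ¬ s % 2 ≠ 0 := by omega
      have hb : (s + 1) % 2 ≠ 0 := by omega
      rw [pairLoop, pairLoop_even n rest (s + 2) _ hs2 hrest]
      simp only [PySem.List.enumerate_cons, List.map_cons]
      rw [if_neg ha, if_pos hb]
      have h2 : s + 1 + 1 = s + 2 := by ring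
      rw [h2]; simp

-- pairLoop over an even-length list with an odd start index: bump the even absolute indices
-- (A's odd-length branch body, applied after the head).
theorem pairLoop_odd (n : Int) :
    ∀ (xs : List Int) (s : Int) (out : List Int), s % 2 = 1 → xs.length % 2 = 0 →
      pairLoop n out xs =
        out ++ (PySem.List.enumerate xs s).map (fun p => if p.1 % 2 = 0 then p.2 + n else p.2)
  | [], s, out, hs, hl => by simp [pairLoop, PySem.List.enumerate_nil]
  | [a], s, out, hs, hl => by simp at hl
  | a :: b :: rest, s, out, hs, hl => by
      have hrest : rest.length % 2 = 0 := by simp only [List.length_cons] at hl; omega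
      have hs2 : (s + 2) % 2 = 1 := by omega
      have ha : ¬ s % 2 = 0 := by omega
      have hb : (s + 1) % 2 = 0 := by omega
      rw [pairLoop, pairLoop_odd n rest (s + 2) _ hs2 hrest]
      simp only [PySem.List.enumerate_cons, List.map_cons]
      rw [if_neg ha, if_pos hb]
      have h2 : s + 1 + 1 = s + 2 := by ring
      rw [h2]; simp

-- ===== VERDICT (by name: the statement is the Claim_ definition above) =====
theorem solution_spec : Claim_equal_solution := by
  intro arr n _
  unfold Spec_solution solution solution_alt
  by_cases h : arr.length % 2 ≠ 0
  · rw [if_pos h, if_pos h]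
    cases arr with
    | nil => simp at h
    | cons a rest =>
      have hrest : rest.length % 2 = 0 := by simp only [List.length_cons] at h; omega
      rw [PySem.List.foldl_append_singleton_eq_map]
      change _ = pairLoop n [a + n] rest
      rw [pairLoop_odd n rest 1 _ (by norm_num) hrest]
      simp only [PySem.List.enumerate_cons, List.map_cons]
      norm_num
  · rw [if_neg h, if_neg h]
    rw [PySem.List.foldl_append_singleton_eq_map,
      pairLoop_even n arr 0 [] (by norm_num) (by omega)]
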